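-- pv_equiv track=rewrite | github.com/PeteMango/Contest | Online Assessment/Cisco S25/2.py | funcTwins
-- ===== SOURCE A (Python) =====
-- def funcTwins(inputArr):
-- 	st = set()
-- 	for num in inputArr:
-- 		if num in st:
-- 			st.remove(num)
-- 		else:
-- 			st.add(num)
--
-- 	if not st:
-- 		return -1
--
-- 	return min(st)
-- ===== SOURCE B (Python) =====
-- def funcTwins(inputArr):
--     arr = sorted(inputArr)
--     n = len(arr)
--     i = 0
--     while i < n:
--         j = i + 1
--         while j < n and arr[j] == arr[i]:
--             j += 1
--         if (j - i) % 2 == 1: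
--             return arr[i]
--         i = j
--     return -1
-- ===== Notes on version B (the rewrite author's own statement) =====
-- stated objective: alternative
-- what changed: Replaces the incremental toggle-set with sort-then-scan: sort the array, walk contiguous runs of equal values, and return the first value whose run length is odd (which, being first in sorted order, is the minimum).
import Mathlib
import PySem

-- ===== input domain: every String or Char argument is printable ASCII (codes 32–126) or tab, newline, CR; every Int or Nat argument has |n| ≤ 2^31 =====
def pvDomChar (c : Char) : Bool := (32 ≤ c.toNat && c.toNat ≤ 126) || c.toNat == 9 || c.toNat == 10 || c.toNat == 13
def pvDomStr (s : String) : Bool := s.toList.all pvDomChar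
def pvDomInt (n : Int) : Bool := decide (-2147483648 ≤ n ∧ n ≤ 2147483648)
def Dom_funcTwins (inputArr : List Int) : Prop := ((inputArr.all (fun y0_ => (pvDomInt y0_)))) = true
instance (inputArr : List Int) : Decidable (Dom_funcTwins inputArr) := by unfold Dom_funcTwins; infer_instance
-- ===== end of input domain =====

-- B replaces A's incremental toggle-set by sort-then-scan: sort, walk the contiguous
-- runs of equal values in order, return the first value whose run length is odd.

-- ===== PORT A =====
-- one loop iteration of A: toggle membership of num in st
def funcTwinsStep (st : PySem.Set Int) (num : Int) : PySem.Set Int :=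
  if st.contains num then (st.remove? num).getD st else st.add num

def funcTwins (inputArr : List Int) : Int :=
  let st : PySem.Set Int := inputArr.foldl funcTwinsStep PySem.Set.empty
  if st.isEmpty then -1
  else (PySem.List.min? st (fun x => x)).getD 0

-- ===== PORT B =====
-- outer while over the suffix arr[i:]; the inner while 'j += 1 while arr[j] == arr[i]'
-- is the takeWhile/dropWhile split of the current run (j - i = 1 + run of equals after i)
def funcTwinsRunScan (arr : List Int) : Int :=
  match arr with
  | [] => -1
  | x :: rest =>
      let k : Nat := 1 + (rest.takeWhile (fun y => y == x)).length
      if PySem.Int.mod (k : Int) 2 == 1 then x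
      else funcTwinsRunScan (rest.dropWhile (fun y => y == x))
termination_by arr.length
decreasing_by
  simp only [List.length_cons]
  exact Nat.lt_succ_of_le (List.Sublist.length_le (List.dropWhile_sublist _))

def funcTwins_alt (inputArr : List Int) : Int :=
  funcTwinsRunScan (PySem.List.sorted inputArr (fun x => x) false)

-- ===== PRECONDITION & SPEC =====
def Spec_funcTwins (inputArr : List Int) (out : Int) : Prop := out = funcTwins_alt inputArr
instance (inputArr : List Int) (out : Int) : Decidable (Spec_funcTwins inputArr out) := by unfold Spec_funcTwins; infer_instance

-- ===== CLAIM (what is proved, stated in full; the proofs are below) =====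
def Claim_equal_funcTwins : Prop := ∀ (inputArr : List Int), Dom_funcTwins inputArr → Spec_funcTwins inputArr (funcTwins inputArr)

-- ===== LEMMAS AND PROOFS =====

-- the common specification both programs meet: -1 if no odd-count element, else their min
def oddsOf (l : List Int) : List Int := l.filter (fun x => l.count x % 2 == 1)

def oddMin (l : List Int) : Int :=
  if (oddsOf l).isEmpty then -1 else (PySem.List.min? (oddsOf l) (fun x => x)).getD 0

-- A's toggle step preserves distinctness of the set's element list
lemma nodup_funcTwinsStep (st : PySem.Set Int) (num : Int) (h : st.Nodup) :
    (funcTwinsStep st num).Nodup := by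
  unfold funcTwinsStep
  split
  · next hc =>
    rw [PySem.Set.remove?_of_mem ((PySem.Set.contains_iff st num).mp hc)]
    exact h.filter _
  · exact PySem.Set.nodup_add st num h

-- membership after A's toggle loop: x is in iff its parity flipped an odd number of times
lemma mem_foldl_funcTwinsStep (l : List Int) (st : PySem.Set Int) (h : st.Nodup) (x : Int) :
    x ∈ l.foldl funcTwinsStep st ↔ ((x ∈ st) ↔ Even (l.count x)) := by
  induction l generalizing st with
  | nil => simp
  | cons a t ih =>
    rw [List.foldl_cons, ih _ (nodup_funcTwinsStep st a h)]
    have hmem : x ∈ funcTwinsStep st a ↔ (if x = a then x ∉ st else x ∈ st) := by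
      unfold funcTwinsStep
      split
      · next hc =>
        rw [PySem.Set.remove?_of_mem ((PySem.Set.contains_iff st a).mp hc), Option.getD_some,
          PySem.Set.mem_discard]
        have ha : a ∈ st := (PySem.Set.contains_iff st a).mp hc
        split <;> simp_all
      · next hc =>
        have ha : a ∉ st := fun hm => hc ((PySem.Set.contains_iff st a).mpr hm)
        rw [PySem.Set.mem_add]
        split <;> simp_all
    by_cases hxa : x = a
    · subst hxa
      rw [if_pos rfl] at hmem
      rw [hmem, List.count_cons_self, Nat.even_add_one]
      tauto
    · rw [hmem, if_neg hxa, List.count_cons_of_ne (Ne.symm hxa)]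

-- characterisation of A's final set: elements of the input with odd multiplicity
lemma mem_stA (xs : List Int) (x : Int) :
    x ∈ xs.foldl funcTwinsStep PySem.Set.empty ↔ (x ∈ xs ∧ ¬ Even (xs.count x)) := by
  rw [mem_foldl_funcTwinsStep xs PySem.Set.empty List.nodup_nil x]
  have hemp : x ∉ PySem.Set.empty := by simp [PySem.Set.empty]
  constructor
  · intro hiff
    have hodd : ¬ Even (xs.count x) := fun he => hemp (hiff.mpr he)
    have hcnt : xs.count x ≠ 0 := fun h0 => hodd (h0 ▸ ⟨0, rfl⟩)
    exact ⟨List.count_pos_iff.mp (Nat.pos_of_ne_zero hcnt), hodd⟩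
  · intro ⟨_, hodd⟩
    exact ⟨fun hmem => absurd hmem hemp, fun he => absurd he hodd⟩

-- the Bool parity test is oddness
lemma odd_beq_iff (c : Nat) : ((c % 2 == 1) = true) ↔ ¬ Even c := by
  rw [beq_iff_eq, Nat.even_iff]; omega

-- membership in oddsOf
lemma mem_oddsOf (l : List Int) (x : Int) :
    x ∈ oddsOf l ↔ (x ∈ l ∧ ¬ Even (l.count x)) := by
  simp only [oddsOf, List.mem_filter, odd_beq_iff]

-- two lists with the same members have the same Python min (and the same emptiness)
lemma min_eq_of_mem_iff (l₁ l₂ : List Int) (h : ∀ x, x ∈ l₁ ↔ x ∈ l₂) :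
    (if l₁.isEmpty then (-1 : Int) else (PySem.List.min? l₁ (fun x => x)).getD 0)
      = (if l₂.isEmpty then -1 else (PySem.List.min? l₂ (fun x => x)).getD 0) := by
  by_cases h1 : l₁ = []
  · subst h1
    have h2 : l₂ = [] := List.eq_nil_iff_forall_not_mem.mpr (fun x hx => (List.not_mem_nil) ((h x).mpr hx))
    simp [h2]
  · have h2 : l₂ ≠ [] := by
      intro hnil
      exact h1 (List.eq_nil_iff_forall_not_mem.mpr (fun x hx => by
        have := (h x).mp hx; simp [hnil] at this))
    have hn1 : PySem.List.min? l₁ (fun x : Int => x) ≠ none := by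
      intro hn; exact h1 ((PySem.List.min?_eq_none_iff _ _).mp hn)
    have hn2 : PySem.List.min? l₂ (fun x : Int => x) ≠ none := by
      intro hn; exact h2 ((PySem.List.min?_eq_none_iff _ _).mp hn)
    obtain ⟨m₁, hm₁⟩ := Option.ne_none_iff_exists'.mp hn1
    obtain ⟨m₂, hm₂⟩ := Option.ne_none_iff_exists'.mp hn2
    simp only [List.isEmpty_iff, if_neg h1, if_neg h2, hm₁, hm₂, Option.getD_some]
    have e1 : m₁ ∈ l₂ := (h m₁).mp (PySem.List.min?_mem hm₁)
    have e2 : m₂ ∈ l₁ := (h m₂).mpr (PySem.List.min?_mem hm₂)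
    exact le_antisymm (PySem.List.min?_isMin hm₁ m₂ e2) (PySem.List.min?_isMin hm₂ m₁ e1)

-- a list containing a lower bound of itself has that bound as its Python min
lemma oddMin_eq_of_least (l : List Int) (x : Int) (hx : x ∈ oddsOf l)
    (hle : ∀ y ∈ oddsOf l, x ≤ y) : oddMin l = x := by
  unfold oddMin
  have hne : oddsOf l ≠ [] := fun h => by simp [h] at hx
  have hn : PySem.List.min? (oddsOf l) (fun x : Int => x) ≠ none := by
    intro hn; exact hne ((PySem.List.min?_eq_none_iff _ _).mp hn)
  obtain ⟨m, hm⟩ := Option.ne_none_iff_exists'.mp hn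
  rw [if_neg (by simpa [List.isEmpty_iff] using hne), hm, Option.getD_some]
  exact le_antisymm (PySem.List.min?_isMin hm x hx) (hle m (PySem.List.min?_mem hm))

-- oddMin depends only on membership of oddsOf
lemma oddMin_congr (l₁ l₂ : List Int) (h : ∀ x, x ∈ oddsOf l₁ ↔ x ∈ oddsOf l₂) :
    oddMin l₁ = oddMin l₂ := by
  unfold oddMin
  exact min_eq_of_mem_iff _ _ h

-- A computes oddMin
lemma funcTwins_eq_oddMin (xs : List Int) : funcTwins xs = oddMin xs := by
  unfold funcTwins oddMin
  exact min_eq_of_mem_iff _ _ (fun x => (mem_stA xs x).trans (mem_oddsOf xs x).symm)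

-- in a sorted list, everything after dropping the leading run of x is greater than x
lemma dropWhile_gt (x : Int) (rest : List Int) (hrest : ∀ y ∈ rest, x ≤ y)
    (hp : rest.Pairwise (fun a b => a ≤ b)) :
    ∀ y ∈ rest.dropWhile (fun y => y == x), x < y := by
  induction rest with
  | nil => simp
  | cons a t ih =>
    by_cases hax : a = x
    · rw [List.dropWhile_cons_of_pos (by simp [hax])]
      exact ih (fun y hy => hrest y (List.mem_cons_of_mem a hy)) (List.pairwise_cons.mp hp).2
    · rw [List.dropWhile_cons_of_neg (by simp [hax])]
      intro y hy
      have hxa : x < a := lt_of_le_of_ne (hrest a List.mem_cons_self) (Ne.symm hax)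
      rcases List.mem_cons.mp hy with rfl | hyt
      · exact hxa
      · exact lt_of_lt_of_le hxa ((List.pairwise_cons.mp hp).1 y hyt)

-- B's run scan computes oddMin on any sorted list (strong induction on the length)
lemma runScan_eq_oddMin (n : Nat) :
    ∀ l : List Int, l.length ≤ n → l.Pairwise (fun a b => a ≤ b) →
      funcTwinsRunScan l = oddMin l := by
  induction n with
  | zero =>
    intro l hl _
    rw [List.length_eq_zero_iff.mp (Nat.le_zero.mp hl)]
    simp [funcTwinsRunScan, oddMin, oddsOf]
  | succ n ih =>
    intro l hl hs
    cases l with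
    | nil => simp [funcTwinsRunScan, oddMin, oddsOf]
    | cons x rest =>
      have hrest : ∀ y ∈ rest, x ≤ y := fun y hy => (List.pairwise_cons.mp hs).1 y hy
      have hp : rest.Pairwise (fun a b => a ≤ b) := (List.pairwise_cons.mp hs).2
      have hr1x : ∀ y ∈ rest.takeWhile (fun y => y == x), y = x := fun y hy => by
        simpa using List.mem_takeWhile_imp hy
      have hr2gt : ∀ y ∈ rest.dropWhile (fun y => y == x), x < y :=
        dropWhile_gt x rest hrest hp
      have hnotmem2 : x ∉ rest.dropWhile (fun y => y == x) :=
        fun hm => lt_irrefl x (hr2gt x hm)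
      have hsplit : rest.takeWhile (fun y => y == x) ++ rest.dropWhile (fun y => y == x) = rest :=
        List.takeWhile_append_dropWhile
      have hcnt : ∀ y : Int, rest.count y
          = (rest.takeWhile (fun y => y == x)).count y
            + (rest.dropWhile (fun y => y == x)).count y := by
        intro y
        have h1 : ((rest.takeWhile (fun y => y == x)) ++ (rest.dropWhile (fun y => y == x))).count y
            = (rest.takeWhile (fun y => y == x)).count y
              + (rest.dropWhile (fun y => y == x)).count y := List.count_append ..
        rw [hsplit] at h1
        exact h1
      have hcx : (x :: rest).count x = 1 + (rest.takeWhile (fun y => y == x)).length := by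
        have c1 : (rest.takeWhile (fun y => y == x)).count x
            = (rest.takeWhile (fun y => y == x)).length :=
          List.count_eq_length.mpr (fun y hy => by simpa [eq_comm] using hr1x y hy)
        have c2 : (rest.dropWhile (fun y => y == x)).count x = 0 :=
          List.count_eq_zero.mpr hnotmem2
        rw [List.count_cons_self, hcnt x, c1, c2]
        omega
      have hcy : ∀ y ∈ rest.dropWhile (fun y => y == x),
          (x :: rest).count y = (rest.dropWhile (fun y => y == x)).count y := by
        intro y hy
        have hyx : y ≠ x := fun h => hnotmem2 (h ▸ hy)
        have c1 : (rest.takeWhile (fun y => y == x)).count y = 0 :=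
          List.count_eq_zero.mpr (fun hm => hyx (hr1x y hm))
        rw [List.count_cons_of_ne (Ne.symm hyx), hcnt y, c1]
        omega
      have hmr : ∀ y : Int, y ∈ rest ↔
          (y ∈ rest.takeWhile (fun y => y == x) ∨ y ∈ rest.dropWhile (fun y => y == x)) := by
        intro y
        constructor
        · intro h
          rw [← hsplit] at h
          exact List.mem_append.mp h
        · intro h
          exact hsplit ▸ List.mem_append.mpr h
      have hmem : ∀ y, y ∈ (x :: rest) ↔ (y = x ∨ y ∈ rest.dropWhile (fun y => y == x)) := by
        intro y
        rw [List.mem_cons]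
        constructor
        · rintro (rfl | hy)
          · exact Or.inl rfl
          · rcases (hmr y).mp hy with h1 | h2
            · exact Or.inl (hr1x y h1)
            · exact Or.inr h2
        · rintro (rfl | hy)
          · exact Or.inl rfl
          · exact Or.inr ((hmr y).mpr (Or.inr hy))
      have hmod : ∀ c : Nat, (PySem.Int.mod (c : Int) 2 == 1) = true ↔ ¬ Even c := by
        intro c
        rw [beq_iff_eq, PySem.Int.mod_eq_emod_of_pos (by norm_num), Nat.even_iff]
        omega
      simp only [funcTwinsRunScan]
      split
      · next hodd =>
        -- the first run is odd: x is an odd-count element and the least element of the list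
        have hoddk : ¬ Even (1 + (rest.takeWhile (fun y => y == x)).length) := (hmod _).mp hodd
        refine (oddMin_eq_of_least _ x ?_ ?_).symm
        · exact (mem_oddsOf _ x).mpr ⟨List.mem_cons_self, hcx ▸ hoddk⟩
        · intro y hy
          rcases (hmem y).mp ((mem_oddsOf _ y).mp hy).1 with rfl | hy2
          · exact le_refl _
          · exact le_of_lt (hr2gt y hy2)
      · next heven =>
        -- the first run is even: x drops out, odd-count elements are those of the remainder
        have hevk : Even (1 + (rest.takeWhile (fun y => y == x)).length) := by
          by_contra hc; exact heven ((hmod _).mpr hc)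
        have hp2 : (rest.dropWhile (fun y => y == x)).Pairwise (fun a b => a ≤ b) :=
          hp.sublist (List.dropWhile_sublist _)
        have hlen : (rest.dropWhile (fun y => y == x)).length ≤ n := by
          have hsub : (rest.dropWhile (fun y => y == x)).Sublist rest := List.dropWhile_sublist _
          have := hsub.length_le
          simp only [List.length_cons] at hl
          omega
        rw [ih _ hlen hp2]
        refine (oddMin_congr _ _ (fun y => ?_)).symm
        rw [mem_oddsOf, mem_oddsOf]
        constructor
        · rintro ⟨hy, hodd⟩
          rcases (hmem y).mp hy with rfl | hy2
          · exact absurd (hcx ▸ hevk) hodd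
          · exact ⟨hy2, (hcy y hy2) ▸ hodd⟩
        · rintro ⟨hy, hodd⟩
          exact ⟨(hmem y).mpr (Or.inr hy), (hcy y hy) ▸ hodd⟩

-- counts and membership are invariant under sorting, so oddMin is too
lemma oddMin_sorted (xs : List Int) :
    oddMin (PySem.List.sorted xs (fun x => x) false) = oddMin xs := by
  have hperm : (PySem.List.sorted xs (fun x => x) false).Perm xs := PySem.List.sorted_perm xs (fun x => x) false
  refine oddMin_congr _ _ (fun x => ?_)
  rw [mem_oddsOf, mem_oddsOf, hperm.mem_iff, hperm.count_eq]

-- ===== VERDICT (by name: the statement is the Claim_ definition above) =====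
theorem funcTwins_spec : Claim_equal_funcTwins := by
  intro inputArr _
  unfold Spec_funcTwins funcTwins_alt
  rw [funcTwins_eq_oddMin, ← oddMin_sorted]
  exact (runScan_eq_oddMin (PySem.List.sorted inputArr (fun x => x) false).length _
    le_rfl (by simpa using PySem.List.sorted_pairwise inputArr (fun x => x))).symm
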